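-- pv_equiv track=rewrite | github.com/HangYang0204/Python_Notes | list-exercise.py | _cretenested_
-- ===== SOURCE A (Python) =====
-- def _cretenested_(l):
--     index = 0
--     res = []
--     while index < len(l):
--         tem = []
--         j = 0
--         while j <= index:
--             tem.append(l[j])
--             j = j + 1
--         index = index + 1
--         res.append(tem)
--     return res
-- ===== SOURCE B (Python) =====
-- def _cretenested_(l):
--     res = []
--     prefix = []
--     for x in l:
--         prefix = prefix + [x]
--         res.append(prefix)
--     return res
-- ===== Notes on version B (the rewrite author's own statement) =====
-- stated objective: alternative
-- what changed: Replaces A's nested index loops (rebuilding each prefix from index 0) with a single pass over the elements that carries an incrementally extended prefix accumulator.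
import Mathlib
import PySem

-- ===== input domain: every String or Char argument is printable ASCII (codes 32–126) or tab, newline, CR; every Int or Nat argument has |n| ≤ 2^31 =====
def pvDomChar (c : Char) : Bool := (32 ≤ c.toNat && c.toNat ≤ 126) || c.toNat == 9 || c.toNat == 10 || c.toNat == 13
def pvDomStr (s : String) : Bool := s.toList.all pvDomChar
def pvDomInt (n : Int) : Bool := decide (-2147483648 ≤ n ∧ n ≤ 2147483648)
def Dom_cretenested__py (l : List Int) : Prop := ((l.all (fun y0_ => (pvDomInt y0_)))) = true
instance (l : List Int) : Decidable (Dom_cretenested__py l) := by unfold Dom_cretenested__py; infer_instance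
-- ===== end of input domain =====

-- B replaces A's inner rescan-from-zero with a single pass carrying an incrementally extended prefix accumulator (objective: alternative single-pass decomposition).

-- ===== PORT A =====
-- outer while over index ∈ [0, len l); inner while over j ∈ [0, index], appending l[j] (always in range)
def cretenested__py (l : List Int) : List (List Int) :=
  (PySem.List.pyRange 0 (l.length : Int) 1).foldl
    (fun res index =>
      res ++ [(PySem.List.pyRange 0 (index + 1) 1).foldl
        (fun tem j => tem ++ [PySem.List.pyGetD l j 0]) []])
    []

-- ===== PORT B =====
-- single fold over l carrying (prefix, res); prefix is extended by one element each step
def cretenested__py_alt (l : List Int) : List (List Int) :=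
  (l.foldl (fun (st : List Int × List (List Int)) x =>
      (st.1 ++ [x], st.2 ++ [st.1 ++ [x]])) ([], [])).2

-- ===== PRECONDITION & SPEC =====
def Spec_cretenested__py (l : List Int) (out : List (List Int)) : Prop := out = cretenested__py_alt l
instance (l : List Int) (out : List (List Int)) : Decidable (Spec_cretenested__py l out) := by unfold Spec_cretenested__py; infer_instance

-- ===== CLAIM (what is proved, stated in full; the proofs are below) =====
def Claim_equal_cretenested__py : Prop := ∀ (l : List Int), Dom_cretenested__py l → Spec_cretenested__py l (cretenested__py l)

-- ===== LEMMAS AND PROOFS =====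

-- common specification: the list of nonempty prefixes of l
def pvPrefixes (l : List Int) : List (List Int) :=
  (List.range l.length).map (fun i => l.take (i + 1))

lemma pv_map_pyGetD_range (l : List Int) (m : Nat) (h : m ≤ l.length) :
    (List.range m).map (fun (k : Nat) => PySem.List.pyGetD l ((k : Int)) 0) = l.take m := by
  induction m with
  | zero => simp
  | succ n ih =>
    rw [List.range_succ, List.map_append, ih (by omega), List.take_succ]
    have hn : n < l.length := by omega
    simp [PySem.List.pyGetD_natCast, List.getElem?_eq_getElem hn, List.getD]

lemma pv_A_eq_prefixes (l : List Int) : cretenested__py l = pvPrefixes l := by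
  unfold cretenested__py pvPrefixes
  rw [PySem.List.foldl_append_singleton_eq_map]
  rw [show ((l.length : Int)) = ((l.length : Nat) : Int) from rfl,
      PySem.List.pyRange_zero_nat, List.map_map]
  apply List.map_congr_left
  intro i hi
  have hil : i < l.length := List.mem_range.mp hi
  rw [Function.comp_apply, PySem.List.foldl_append_singleton_eq_map]
  rw [show ((i : Int) + 1) = (((i + 1 : Nat) : Int)) from by push_cast; ring,
      PySem.List.pyRange_zero_nat, List.map_map]
  exact pv_map_pyGetD_range l (i + 1) (by omega)

lemma pv_prefixes_snoc (l : List Int) (x : Int) :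
    pvPrefixes (l ++ [x]) = pvPrefixes l ++ [l ++ [x]] := by
  unfold pvPrefixes
  rw [List.length_append, List.length_singleton, List.range_succ, List.map_append]
  congr 1
  · apply List.map_congr_left
    intro i hi
    have : i < l.length := List.mem_range.mp hi
    rw [List.take_append_of_le_length (by omega)]
  · simp

lemma pv_B_inv (l : List Int) :
    l.foldl (fun (st : List Int × List (List Int)) x =>
      (st.1 ++ [x], st.2 ++ [st.1 ++ [x]])) ([], []) = (l, pvPrefixes l) := by
  induction l using List.reverseRecOn with
  | nil => simp [pvPrefixes]
  | append_singleton l x ih =>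
    rw [List.foldl_append, ih, pv_prefixes_snoc]
    rfl

-- ===== VERDICT (by name: the statement is the Claim_ definition above) =====
theorem cretenested__py_spec : Claim_equal_cretenested__py := by
  intro l _
  unfold Spec_cretenested__py cretenested__py_alt
  rw [pv_B_inv, pv_A_eq_prefixes]
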